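-- pv_equiv track=rewrite | github.com/cfa19/test_pop_ai-latest | rag/chunk_user_manual.py | split_runners_file
-- ===== SOURCE A (Python) =====
-- def split_runners_file(content: str) -> list[tuple[str, str, str]]:
--     """
--     Special handling for runners.md: split by ### headers.
--     Returns list of (category, runner_name, content).
--     """
--     chunks = []
--     current_category = "Runners"
--     current_runner = None
--     current_lines = []
--
--     for line in content.split("\n"):
--         if line.startswith("## ") and not line.startswith("## CHUNK"):
--             # Category header (e.g., ## CV Analysis)
--             if current_runner and current_lines:
--                 chunks.append((current_category, current_runner, "\n".join(current_lines).strip()))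
--                 current_lines = []
--             current_category = line.lstrip("#").strip()
--             current_runner = None
--         elif line.startswith("### "):
--             # Runner header
--             if current_runner and current_lines:
--                 chunks.append((current_category, current_runner, "\n".join(current_lines).strip()))
--                 current_lines = []
--             current_runner = line.lstrip("#").strip()
--             current_lines = [line]
--         elif line.strip() == "---":
--             continue  # Skip separators
--         else:
--             if current_runner:
--                 current_lines.append(line)
--
--     # Last runner
--     if current_runner and current_lines:
--         chunks.append((current_category, current_runner, "\n".join(current_lines).strip()))
--
--     return chunks
-- ===== SOURCE B (Python) =====
-- def split_runners_file(content: str) -> list[tuple[str, str, str]]: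
--     """
--     Split runners.md into (category, runner_name, content) chunks.
--     Index/slice re-implementation: find header boundaries first, then take
--     each runner's block as a slice up to the next header.
--     """
--     lines = content.split("\n")
--     n = len(lines)
--
--     def is_cat(l):
--         return l.startswith("## ") and not l.startswith("## CHUNK")
--
--     def is_run(l):
--         return l.startswith("### ")
--
--     chunks = []
--     category = "Runners"
--     i = 0
--     while i < n:
--         line = lines[i]
--         if is_cat(line):
--             category = line.lstrip("#").strip()
--             i += 1
--         elif is_run(line):
--             j = i + 1
--             while j < n and not is_cat(lines[j]) and not is_run(lines[j]):
--                 j += 1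
--             name = line.lstrip("#").strip()
--             if name:
--                 body = [line] + [l for l in lines[i + 1:j] if l.strip() != "---"]
--                 chunks.append((category, name, "\n".join(body).strip()))
--             i = j
--         else:
--             i += 1
--     return chunks
-- ===== Notes on version B (the rewrite author's own statement) =====
-- stated objective: alternative
-- what changed: Replaces A's single fused state-machine loop (accumulating current category/runner/lines and flushing on each header) with an index-jump pass: locate each runner header, slice its block up to the next category-or-runner header in an inner scan, and emit the chunk directly.
import Mathlib
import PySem

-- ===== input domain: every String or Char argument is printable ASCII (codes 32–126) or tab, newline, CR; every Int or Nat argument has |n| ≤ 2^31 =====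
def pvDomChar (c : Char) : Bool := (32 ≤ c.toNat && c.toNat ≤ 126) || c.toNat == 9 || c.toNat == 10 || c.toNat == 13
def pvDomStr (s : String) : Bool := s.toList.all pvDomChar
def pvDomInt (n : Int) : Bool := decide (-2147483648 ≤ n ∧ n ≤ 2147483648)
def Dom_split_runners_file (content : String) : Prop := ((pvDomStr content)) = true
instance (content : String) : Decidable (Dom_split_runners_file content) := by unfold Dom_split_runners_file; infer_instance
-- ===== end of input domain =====

-- B replaces A's fused state-machine accumulator loop by an index/slice pass
-- (jump to each runner header, take its block as one slice up to the next header);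
-- same cost, different decomposition (objective: alternative).

-- Shared hand-port of Python's `l.lstrip("#")` (no PySem primitive takes a char set
-- on one side): drops the maximal leading run of '#'; exact on all strings.
def pvLstripHash (l : String) : String := String.ofList (l.toList.dropWhile (fun c => c == '#'))

-- Python truthiness of `current_runner` (None or "" are falsy; any other string truthy).
def pvTruthy (o : Option String) : Bool := (o.getD "") != ""

-- ===== PORT A =====
-- one iteration of A's `for line in content.split("\n")` loop over the state
-- (chunks, current_category, current_runner, current_lines)
def pvStepA (st : (List (String × String × String)) × String × Option String × List String)
    (line : String) : (List (String × String × String)) × String × Option String × List String :=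
  match st with
  | (chunks, cat, runner, acc) =>
    if PySem.Str.startswith line "## " && !(PySem.Str.startswith line "## CHUNK") then
      if pvTruthy runner && !acc.isEmpty then
        (chunks ++ [(cat, runner.getD "", PySem.Str.strip (PySem.Str.join "\n" acc))],
         PySem.Str.strip (pvLstripHash line), none, ([] : List String))
      else
        (chunks, PySem.Str.strip (pvLstripHash line), none, acc)
    else if PySem.Str.startswith line "### " then
      ((if pvTruthy runner && !acc.isEmpty then
          chunks ++ [(cat, runner.getD "", PySem.Str.strip (PySem.Str.join "\n" acc))]
        else chunks),
       cat, some (PySem.Str.strip (pvLstripHash line)), [line])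
    else if PySem.Str.strip line == "---" then
      (chunks, cat, runner, acc)
    else
      (chunks, cat, runner, if pvTruthy runner then acc ++ [line] else acc)

def split_runners_file (content : String) : List (String × String × String) :=
  match ((PySem.Str.split? content "\n").getD [content]).foldl pvStepA ([], "Runners", none, []) with
  | (chunks, cat, runner, acc) =>
    -- Last runner
    if pvTruthy runner && !acc.isEmpty then
      chunks ++ [(cat, runner.getD "", PySem.Str.strip (PySem.Str.join "\n" acc))]
    else chunks

-- ===== PORT B =====
-- Source B's local classifiers is_cat / is_run
def pvIsCat (l : String) : Bool := PySem.Str.startswith l "## " && !(PySem.Str.startswith l "## CHUNK")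
def pvIsRun (l : String) : Bool := PySem.Str.startswith l "### "
def pvNotHdr (l : String) : Bool := !pvIsCat l && !pvIsRun l
def pvNotSep (l : String) : Bool := PySem.Str.strip l != "---"

-- Source B's while loop with index jumps: the inner `while j < n and not is_cat … and not is_run …`
-- is the dropWhile/takeWhile split, `lines[i+1:j]` the takeWhile slice.
def pvGoB : List String → String → List (String × String × String)
  | [], _ => []
  | line :: rest, cat =>
    if pvIsCat line then
      pvGoB rest (PySem.Str.strip (pvLstripHash line))
    else if pvIsRun line then
      (if PySem.Str.strip (pvLstripHash line) ≠ "" then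
        [(cat, PySem.Str.strip (pvLstripHash line),
          PySem.Str.strip (PySem.Str.join "\n" (line :: (rest.takeWhile pvNotHdr).filter pvNotSep)))]
       else []) ++ pvGoB (rest.dropWhile pvNotHdr) cat
    else
      pvGoB rest cat
termination_by lines _ => lines.length
decreasing_by
  · simp
  · exact Nat.lt_succ_of_le (List.length_dropWhile_le _ _)
  · simp

def split_runners_file_alt (content : String) : List (String × String × String) :=
  pvGoB ((PySem.Str.split? content "\n").getD [content]) "Runners"

-- ===== PRECONDITION & SPEC =====
def Spec_split_runners_file (content : String) (out : List (String × String × String)) : Prop := out = split_runners_file_alt content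
instance (content : String) (out : List (String × String × String)) : Decidable (Spec_split_runners_file content out) := by unfold Spec_split_runners_file; infer_instance

-- ===== CLAIM (what is proved, stated in full; the proofs are below) =====
def Claim_equal_split_runners_file : Prop := ∀ (content : String), Dom_split_runners_file content → Spec_split_runners_file content (split_runners_file content)

-- ===== LEMMAS AND PROOFS =====

-- A's flush of the pending chunk (the `Last runner` tail and the flush at each header).
def pvFinishA (st : (List (String × String × String)) × String × Option String × List String) :
    List (String × String × String) :=
  match st with
  | (chunks, cat, runner, acc) =>
    if pvTruthy runner && !acc.isEmpty then
      chunks ++ [(cat, runner.getD "", PySem.Str.strip (PySem.Str.join "\n" acc))]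
    else chunks

-- B skips non-header lines at top level, so dropping a non-header prefix is invisible to it.
lemma pvGoB_dropWhile (lines : List String) (cat : String) :
    pvGoB (lines.dropWhile pvNotHdr) cat = pvGoB lines cat := by
  induction lines with
  | nil => simp
  | cons line rest ih =>
    by_cases h : pvNotHdr line = true
    · have h1 : pvIsCat line = false := by
        simp [pvNotHdr] at h; simp [h.1]
      have h2 : pvIsRun line = false := by
        simp [pvNotHdr] at h; simp [h.2]
      simp [List.dropWhile, h, ih, pvGoB, h1, h2]
    · simp [List.dropWhile, h]

-- Main invariant: running A's loop from a falsy-runner state appends exactly B's chunks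
-- for the remaining lines; from a truthy-runner state it first appends the pending chunk,
-- whose content is the accumulator plus the non-separator lines up to the next header.
lemma pvMain (lines : List String) :
    (∀ chunks cat runner acc, pvTruthy runner = false →
        pvFinishA (lines.foldl pvStepA (chunks, cat, runner, acc)) = chunks ++ pvGoB lines cat)
    ∧ (∀ chunks cat r acc, r ≠ "" → acc ≠ [] →
        pvFinishA (lines.foldl pvStepA (chunks, cat, some r, acc)) =
          chunks ++ (cat, r, PySem.Str.strip (PySem.Str.join "\n"
              (acc ++ (lines.takeWhile pvNotHdr).filter pvNotSep)))
            :: pvGoB (lines.dropWhile pvNotHdr) cat) := by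
  induction lines with
  | nil =>
    constructor
    · intro chunks cat runner acc hfalse
      simp [pvFinishA, hfalse, pvGoB]
    · intro chunks cat r acc hr hacc
      have ht : pvTruthy (some r) = true := by simp [pvTruthy, hr]
      simp [pvFinishA, ht, hacc, pvGoB]
  | cons line rest ih =>
    constructor
    · intro chunks cat runner acc hfalse
      by_cases hc : pvIsCat line = true
      · have : pvStepA (chunks, cat, runner, acc) line = (chunks, PySem.Str.strip (pvLstripHash line), none, acc) := by
          have hct : pvIsCat line = true := hc
          simp only [pvStepA]
          rw [show (PySem.Str.startswith line "## " && !(PySem.Str.startswith line "## CHUNK")) = pvIsCat line from rfl, hct]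
          simp [hfalse]
        have h2 := ih.1 chunks (PySem.Str.strip (pvLstripHash line)) none acc (by simp [pvTruthy])
        simp [List.foldl, this, h2, pvGoB, hc]
      · by_cases hrn : pvIsRun line = true
        · have hstep : pvStepA (chunks, cat, runner, acc) line =
              (chunks, cat, some (PySem.Str.strip (pvLstripHash line)), [line]) := by
            have hcf : pvIsCat line = false := by simpa using hc
            have hrt : pvIsRun line = true := hrn
            simp only [pvStepA]
            rw [show (PySem.Str.startswith line "## " && !(PySem.Str.startswith line "## CHUNK")) = pvIsCat line from rfl, hcf,
                show PySem.Str.startswith line "### " = pvIsRun line from rfl, hrt]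
            simp [hfalse]
          by_cases hname : PySem.Str.strip (pvLstripHash line) = ""
          · have := ih.1 chunks cat (some (PySem.Str.strip (pvLstripHash line))) [line]
              (by simp [pvTruthy, hname])
            rw [hname] at this
            simp [List.foldl, hstep, this, pvGoB, hc, hrn, hname, pvGoB_dropWhile]
          · have := ih.2 chunks cat (PySem.Str.strip (pvLstripHash line)) [line] hname (by simp)
            simp [List.foldl, hstep, this, pvGoB, hc, hrn, hname]
        · have hstep : pvStepA (chunks, cat, runner, acc) line = (chunks, cat, runner, acc) := by
            have hcf : pvIsCat line = false := by simpa using hc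
            have hrf : pvIsRun line = false := by simpa using hrn
            simp only [pvStepA]
            rw [show (PySem.Str.startswith line "## " && !(PySem.Str.startswith line "## CHUNK")) = pvIsCat line from rfl, hcf,
                show PySem.Str.startswith line "### " = pvIsRun line from rfl, hrf]
            by_cases hsep : PySem.Str.strip line = "---" <;> simp [hsep, hfalse]
          simp [List.foldl, hstep, ih.1 _ _ _ _ hfalse, pvGoB, hc, hrn]
    · intro chunks cat r acc hr hacc
      have ht : pvTruthy (some r) = true := by simp [pvTruthy, hr]
      by_cases hc : pvIsCat line = true
      · have h1 : pvNotHdr line = false := by simp [pvNotHdr, hc]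
        have hstep : pvStepA (chunks, cat, some r, acc) line =
            (chunks ++ [(cat, r, PySem.Str.strip (PySem.Str.join "\n" acc))],
             PySem.Str.strip (pvLstripHash line), none, ([] : List String)) := by
          have hct : pvIsCat line = true := hc
          simp only [pvStepA]
          rw [show (PySem.Str.startswith line "## " && !(PySem.Str.startswith line "## CHUNK")) = pvIsCat line from rfl, hct]
          simp [ht, hacc]
        have := ih.1 (chunks ++ [(cat, r, PySem.Str.strip (PySem.Str.join "\n" acc))])
          (PySem.Str.strip (pvLstripHash line)) none [] (by simp [pvTruthy])
        simp [List.foldl, hstep, this, pvGoB, hc, h1, List.takeWhile, List.dropWhile]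
      · by_cases hrn : pvIsRun line = true
        · have h1 : pvNotHdr line = false := by simp [pvNotHdr, hrn]
          have hstep : pvStepA (chunks, cat, some r, acc) line =
              (chunks ++ [(cat, r, PySem.Str.strip (PySem.Str.join "\n" acc))],
               cat, some (PySem.Str.strip (pvLstripHash line)), [line]) := by
            have hcf : pvIsCat line = false := by simpa using hc
            have hrt : pvIsRun line = true := hrn
            simp only [pvStepA]
            rw [show (PySem.Str.startswith line "## " && !(PySem.Str.startswith line "## CHUNK")) = pvIsCat line from rfl, hcf,
                show PySem.Str.startswith line "### " = pvIsRun line from rfl, hrt]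
            simp [ht, hacc]
          by_cases hname : PySem.Str.strip (pvLstripHash line) = ""
          · have := ih.1 (chunks ++ [(cat, r, PySem.Str.strip (PySem.Str.join "\n" acc))])
              cat (some (PySem.Str.strip (pvLstripHash line))) [line] (by simp [pvTruthy, hname])
            rw [hname] at this
            simp [List.foldl, hstep, this, pvGoB, hc, hrn, hname, h1,
              List.takeWhile, List.dropWhile, pvGoB_dropWhile]
          · have := ih.2 (chunks ++ [(cat, r, PySem.Str.strip (PySem.Str.join "\n" acc))])
              cat (PySem.Str.strip (pvLstripHash line)) [line] hname (by simp)
            simp [List.foldl, hstep, this, pvGoB, hc, hrn, hname, h1,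
              List.takeWhile, List.dropWhile]
        · have h1 : pvNotHdr line = true := by simp [pvNotHdr, hc, hrn]
          by_cases hsep : PySem.Str.strip line = "---"
          · have hstep : pvStepA (chunks, cat, some r, acc) line = (chunks, cat, some r, acc) := by
              have hcf : pvIsCat line = false := by simpa using hc
              have hrf : pvIsRun line = false := by simpa using hrn
              simp only [pvStepA]
              rw [show (PySem.Str.startswith line "## " && !(PySem.Str.startswith line "## CHUNK")) = pvIsCat line from rfl, hcf,
                  show PySem.Str.startswith line "### " = pvIsRun line from rfl, hrf]
              simp [hsep]
            have h2 : pvNotSep line = false := by simp [pvNotSep, hsep]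
            simp [List.foldl, hstep, ih.2 _ _ _ _ hr hacc, List.takeWhile, List.dropWhile, h1, h2]
          · have hstep : pvStepA (chunks, cat, some r, acc) line = (chunks, cat, some r, acc ++ [line]) := by
              have hcf : pvIsCat line = false := by simpa using hc
              have hrf : pvIsRun line = false := by simpa using hrn
              simp only [pvStepA]
              rw [show (PySem.Str.startswith line "## " && !(PySem.Str.startswith line "## CHUNK")) = pvIsCat line from rfl, hcf,
                  show PySem.Str.startswith line "### " = pvIsRun line from rfl, hrf]
              simp [hsep, ht]
            have h2 : pvNotSep line = true := by simp [pvNotSep, hsep]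
            have := ih.2 chunks cat r (acc ++ [line]) hr (by simp)
            simp [List.foldl, hstep, this, List.takeWhile, List.dropWhile, h1, h2]

-- ===== VERDICT (by name: the statement is the Claim_ definition above) =====
theorem split_runners_file_spec : Claim_equal_split_runners_file := by
  intro content _
  unfold Spec_split_runners_file split_runners_file split_runners_file_alt
  have := (pvMain ((PySem.Str.split? content "\n").getD [content])).1 [] "Runners" none []
    (by simp [pvTruthy])
  simpa [pvFinishA] using this
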